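-- pv_equiv track=rewrite | github.com/chaosFaktor/openspeech | modules/math.py | shift_together
-- ===== SOURCE A (Python) =====
-- def shift_together(arr):
--     c=0
--     new_arr=[]
--     for i in arr:
--         if len(i) == 0:
--             pass
--         else:
--             c+=1
--         new_arr.insert(c, i)
--     return new_arr
-- ===== SOURCE B (Python) =====
-- def shift_together(arr):
--     # Keep the output split at the insertion cursor.  The cursor c only ever
--     # moves forward, so each element crosses it at most once: a pop/append
--     # pair replaces every list.insert.
--     c = 0
--     before = []        # elements to the left of the cursor
--     after = []         # elements to the right of the cursor, last one first
--     for i in arr: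
--         if i:
--             c += 1
--         if len(before) < c and after:
--             before.append(after.pop())
--         after.append(i)
--     after.reverse()
--     return before + after
-- ===== Notes on version B (the rewrite author's own statement) =====
-- stated objective: alternative
-- what changed: Replaces the repeated list.insert at the running count by keeping the output split in two lists at the insertion cursor; the cursor only moves forward, so each element crosses it at most once via a pop/append pair.
import Mathlib
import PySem

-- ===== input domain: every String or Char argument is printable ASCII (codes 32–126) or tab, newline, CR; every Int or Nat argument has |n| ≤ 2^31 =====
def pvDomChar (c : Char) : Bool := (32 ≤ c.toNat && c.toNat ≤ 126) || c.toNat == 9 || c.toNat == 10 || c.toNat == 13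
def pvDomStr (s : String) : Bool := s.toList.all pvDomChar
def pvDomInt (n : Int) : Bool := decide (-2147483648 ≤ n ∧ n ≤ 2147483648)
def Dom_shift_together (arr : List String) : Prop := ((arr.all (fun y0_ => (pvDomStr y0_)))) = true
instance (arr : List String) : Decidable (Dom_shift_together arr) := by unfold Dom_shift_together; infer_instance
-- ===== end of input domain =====

-- B replaces A's list.insert loop by keeping the output split in two lists at the insertion
-- cursor, which only moves forward, so each element crosses it at most once (pop/append).

-- ===== PORT A =====
def pvStepA (st : Int × List String) (i : String) : Int × List String :=
  let c := if PySem.Str.len i = 0 then st.1 else st.1 + 1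
  (c, PySem.List.insert st.2 c i)

def shift_together (arr : List String) : List String :=
  (arr.foldl pvStepA (0, [])).2

-- ===== PORT B =====
def pvStepB (st : Int × List String × List String) (i : String) : Int × List String × List String :=
  let c := if i = "" then st.1 else st.1 + 1
  let bf_af :=
    if (st.2.1.length : Int) < c ∧ st.2.2 ≠ [] then
      (st.2.1 ++ [st.2.2.getLastD ""], st.2.2.dropLast)   -- after.pop(): exact, the guard ensures after is nonempty
    else (st.2.1, st.2.2)
  (c, bf_af.1, bf_af.2 ++ [i])

def shift_together_alt (arr : List String) : List String :=
  let st := arr.foldl pvStepB (0, [], [])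
  st.2.1 ++ st.2.2.reverse

-- ===== PRECONDITION & SPEC =====
def Spec_shift_together (arr : List String) (out : List String) : Prop := out = shift_together_alt arr
instance (arr : List String) (out : List String) : Decidable (Spec_shift_together arr out) := by unfold Spec_shift_together; infer_instance

-- ===== CLAIM =====
def Claim_equal_shift_together : Prop := ∀ (arr : List String), Dom_shift_together arr → Spec_shift_together arr (shift_together arr)

-- ===== LEMMAS AND PROOFS =====

theorem my_insert_clamp {α : Type} (xs : List α) (c : Int) (v : α) (h : 0 ≤ c) :
    PySem.List.insert xs c v = xs.take (min c.toNat xs.length) ++ v :: xs.drop (min c.toNat xs.length) := by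
  simp only [PySem.List.insert, PySem.List.sliceIndices]
  norm_num
  have : (if c < 0 then max (c + ↑xs.length) 0 else min c ↑xs.length).toNat = min c.toNat xs.length := by
    split <;> omega
  rw [this]

-- the invariant tying A's state (c, L) to B's state (c, b, ar)
def pvInv (c : Int) (L b ar : List String) : Prop :=
  L = b ++ ar.reverse ∧ 0 ≤ c ∧ c.toNat ≤ L.length ∧
  b.length = min c.toNat (L.length - 1) ∧ (L ≠ [] → ar ≠ [])

theorem my_step (c : Int) (L b ar : List String) (i : String) (h : pvInv c L b ar) :
    (pvStepA (c, L) i).1 = (pvStepB (c, b, ar) i).1 ∧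
    pvInv (pvStepB (c, b, ar) i).1 (pvStepA (c, L) i).2
      (pvStepB (c, b, ar) i).2.1 (pvStepB (c, b, ar) i).2.2 := by
  obtain ⟨hL, hc0, hcle, hlen, hne⟩ := h
  have hiff : (PySem.Str.len i = 0) = (i = "") := by
    rw [PySem.Str.len_eq]; simp
  simp only [pvStepA, pvStepB, hiff]
  set c' : Int := if i = "" then c else c + 1 with hc'def
  have hc'b : c ≤ c' ∧ c' ≤ c + 1 := by constructor <;> (rw [hc'def]; split <;> omega)
  refine ⟨trivial, ?_⟩
  rcases ar.eq_nil_or_concat with hnil | ⟨as, a, rfl⟩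
  · -- after is empty, hence L and before are empty, c = 0
    subst hnil
    have hLnil : L = [] := by
      by_contra hx; exact (hne hx) rfl
    subst hLnil
    have hb : b = [] := by simpa using hL
    subst hb
    have hc : c = 0 := by omega
    subst hc
    simp only [ne_eq, not_true_eq_false, and_false, if_false]
    refine ⟨?_, by omega, by simp; omega, by simp, by simp⟩
    rw [my_insert_clamp _ _ _ (by omega)]
    simp
  · -- after = as ++ [a]
    have hLe : L = (b ++ [a]) ++ as.reverse := by
      rw [hL]; simp
    have hn : L.length = b.length + 1 + as.length := by rw [hLe]; simp; omega
    by_cases hmv : (b.length : Int) < c'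
    · -- move one element across the cursor
      rw [if_pos ⟨hmv, by simp⟩]
      have hm : min c'.toNat L.length = b.length + 1 := by omega
      constructor
      · rw [my_insert_clamp _ _ _ (by omega), hm, hLe,
          List.take_left' (by simp), List.drop_left' (by simp)]
        simp
      refine ⟨by omega, ?_, ?_, by simp⟩
      · rw [my_insert_clamp _ _ _ (by omega)]
        simp; omega
      · rw [my_insert_clamp _ _ _ (by omega)]
        simp; omega
    · -- cursor stays: insert right at the cursor
      rw [if_neg (by simp [hmv])]
      have hm : min c'.toNat L.length = b.length := by omega
      constructor
      · rw [my_insert_clamp _ _ _ (by omega), hm, hLe]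
        rw [show (b ++ [a]) ++ as.reverse = b ++ (a :: as.reverse) by simp]
        rw [List.take_left' rfl, List.drop_left' rfl]
        simp
      refine ⟨by omega, ?_, ?_, by simp⟩
      · rw [my_insert_clamp _ _ _ (by omega)]
        simp; omega
      · rw [my_insert_clamp _ _ _ (by omega)]
        simp; omega

theorem my_fold (arr : List String) : ∀ (c : Int) (L b ar : List String), pvInv c L b ar →
    (arr.foldl pvStepA (c, L)).2 =
      (arr.foldl pvStepB (c, b, ar)).2.1 ++ (arr.foldl pvStepB (c, b, ar)).2.2.reverse := by
  induction arr with
  | nil => intro c L b ar h; exact h.1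
  | cons i t ih =>
    intro c L b ar h
    obtain ⟨h1, h2⟩ := my_step c L b ar i h
    simp only [List.foldl_cons]
    have hA : pvStepA (c, L) i = ((pvStepB (c, b, ar) i).1, (pvStepA (c, L) i).2) := by
      exact Prod.ext h1 rfl
    have hB : pvStepB (c, b, ar) i =
        ((pvStepB (c, b, ar) i).1, (pvStepB (c, b, ar) i).2.1, (pvStepB (c, b, ar) i).2.2) := rfl
    rw [hA, hB]
    exact ih _ _ _ _ h2

-- ===== VERDICT =====
theorem shift_together_spec : Claim_equal_shift_together := by
  intro arr _
  unfold Spec_shift_together shift_together shift_together_alt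
  exact my_fold arr 0 [] [] [] ⟨rfl, le_refl 0, by simp, by simp, by simp⟩
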